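-- pv_equiv track=rewrite | github.com/laurenhquan/block_blast_buddy | solve.py | convert_piece_format
-- ===== SOURCE A (Python) =====
-- def convert_piece_format(pieces_2d):
--     converted_pieces = {}
--
--     for key,piece in pieces_2d.items():
--         offsets = []
--         base = None
--         for y in range(len(piece)):
--             for x in range(len(piece[0])):
--                 if piece[y][x] != 0:
--                     if base is None:
--                         base = (y, x)
--                         offsets.append((0, 0))
--                     else:
--                         oy = y - base[0]
--                         ox = x - base[1]
--                         offsets.append((oy, ox))
--         converted_pieces[key] = (offsets)
--
--     return converted_pieces
-- ===== SOURCE B (Python) =====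
-- def convert_piece_format(pieces_2d):
--     converted_pieces = {}
--     for key, piece in pieces_2d.items():
--         w = len(piece[0]) if piece else 0
--         flat = []
--         for row in piece:
--             flat.extend(row[:w])
--         idxs = [i for i, v in enumerate(flat) if v != 0]
--         if idxs:
--             i0 = idxs[0]
--             converted_pieces[key] = [(i // w - i0 // w, i % w - i0 % w) for i in idxs]
--         else:
--             converted_pieces[key] = []
--     return converted_pieces
-- ===== Notes on version B (the rewrite author's own statement) =====
-- stated objective: alternative
-- what changed: Instead of A's 2D scan carrying a mutable base sentinel, B flattens each grid row-major into a 1D list, collects the flat indices of nonzero entries, and reconstructs each offset arithmetically as (i//w - i0//w, i%w - i0%w) from the first nonzero flat index i0.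
import Mathlib
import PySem

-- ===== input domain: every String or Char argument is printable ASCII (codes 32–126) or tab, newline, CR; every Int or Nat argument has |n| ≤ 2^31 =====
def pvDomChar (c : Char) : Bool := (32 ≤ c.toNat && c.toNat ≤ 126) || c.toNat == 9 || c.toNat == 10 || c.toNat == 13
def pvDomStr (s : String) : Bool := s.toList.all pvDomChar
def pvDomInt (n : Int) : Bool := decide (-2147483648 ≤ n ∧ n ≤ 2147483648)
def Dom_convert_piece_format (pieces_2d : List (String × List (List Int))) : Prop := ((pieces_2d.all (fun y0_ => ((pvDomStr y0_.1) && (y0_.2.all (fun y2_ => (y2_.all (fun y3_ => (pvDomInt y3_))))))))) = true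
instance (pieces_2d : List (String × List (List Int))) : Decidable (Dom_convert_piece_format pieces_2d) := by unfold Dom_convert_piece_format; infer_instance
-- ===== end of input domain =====

-- B flattens each grid row-major into a 1D list, collects flat indices of nonzero cells,
-- and reconstructs offsets arithmetically with // and % from the first nonzero flat index,
-- instead of A's 2D scan carrying a mutable base sentinel; objective: alternative.


-- ===== PORT A =====
-- A's single pass over each grid, carrying (offsets, base); piece[y][x] is ported as
-- getD …/getD … 0, exact under Pre_ (every inner index x < len(piece[0]) is in range).
def convert_piece_format (pieces_2d : List (String × List (List Int))) : List (String × List (Int × Int)) :=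
  (pieces_2d.foldl (fun converted_pieces kv =>
    converted_pieces.insert kv.1
      ((List.range kv.2.length).foldl (fun st (y : Nat) =>
        (List.range (kv.2.headD []).length).foldl
          (fun (st : List (Int × Int) × Option (Int × Int)) (x : Nat) =>
            if ((kv.2.getD y []).getD x 0) ≠ 0 then
              match st.2 with
              | none   => (st.1 ++ [((0 : Int), (0 : Int))], some ((y : Int), (x : Int)))
              | some b => (st.1 ++ [((y : Int) - b.1, (x : Int) - b.2)], some b)
            else st) st) (([], none) : List (Int × Int) × Option (Int × Int))).1)
    PySem.Dict.empty).items

-- ===== PORT B =====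
-- B: flatten the grid row-major (each row truncated to w = len(piece[0])), list the flat
-- indices of the nonzero entries via enumerate, and rebuild each offset as
-- (i // w - i0 // w, i % w - i0 % w) from the first nonzero flat index i0.
def convert_piece_format_alt (pieces_2d : List (String × List (List Int))) : List (String × List (Int × Int)) :=
  pieces_2d.map (fun (kv : String × List (List Int)) =>
    let w : Nat := (kv.2.headD []).length       -- len(piece[0]) if piece else 0
    let flat : List Int :=
      kv.2.foldl (fun acc row => acc ++ PySem.List.slice row none (some (w : Int))) []
    let idxs : List Int :=
      (PySem.List.enumerate flat 0).filterMap (fun p => if p.2 ≠ 0 then some p.1 else none)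
    match idxs with
    | []      => (kv.1, [])
    | i0 :: _ => (kv.1, idxs.map (fun i =>
        (PySem.Int.floordiv i (w : Int) - PySem.Int.floordiv i0 (w : Int),
         PySem.Int.mod i (w : Int) - PySem.Int.mod i0 (w : Int)))))

-- ===== PRECONDITION & SPEC =====
-- Pre_ excludes exactly the inputs where the Python A raises: ragged grids whose first row is
-- longer than some other row (piece[y][x] raises IndexError in A). The Nodup condition on
-- keys excludes nothing: pieces_2d is a Python dict, which cannot hold duplicate keys.
def Pre_convert_piece_format (pieces_2d : List (String × List (List Int))) : Prop :=
  (pieces_2d.map (·.1)).Nodup ∧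
  ∀ kv ∈ pieces_2d, ∀ row ∈ kv.2, (kv.2.headD []).length ≤ row.length
instance (pieces_2d : List (String × List (List Int))) : Decidable (Pre_convert_piece_format pieces_2d) := by unfold Pre_convert_piece_format; infer_instance
def pvWitness_convert_piece_format : (List (String × List (List Int))) :=
  [("L", [[1, 0], [1, 1]]), ("dot", [[0, 5]]), ("empty", [])]
def Spec_convert_piece_format (pieces_2d : List (String × List (List Int))) (out : List (String × List (Int × Int))) : Prop := out = convert_piece_format_alt pieces_2d
instance (pieces_2d : List (String × List (List Int))) (out : List (String × List (Int × Int))) : Decidable (Spec_convert_piece_format pieces_2d out) := by unfold Spec_convert_piece_format; infer_instance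

-- ===== CLAIM (what is proved, stated in full; the proofs are below) =====
def Claim_equal_convert_piece_format : Prop := ∀ (pieces_2d : List (String × List (List Int))), Dom_convert_piece_format pieces_2d → Pre_convert_piece_format pieces_2d → Spec_convert_piece_format pieces_2d (convert_piece_format pieces_2d)

-- ===== LEMMAS AND PROOFS =====

-- the row-major list of nonzero cell coordinates of a w-wide grid (proof-only helper)
def cellsOf (w : Nat) (rows : List (List Int)) : List (Nat × Nat) :=
  ((List.range rows.length).flatMap (fun y => (List.range w).map (fun x => (y, x)))).filter
    (fun c => decide ((rows.getD c.1 []).getD c.2 0 ≠ 0))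

-- A's per-cell step with its base already set only appends the normalized offset.
theorem cpf_foldl_some (cs : List (Nat × Nat)) (acc : List (Int × Int)) (b : Int × Int) :
    cs.foldl (fun (st : List (Int × Int) × Option (Int × Int)) c =>
        match st.2 with
        | none   => (st.1 ++ [((0 : Int), (0 : Int))], some ((c.1 : Int), (c.2 : Int)))
        | some b => (st.1 ++ [((c.1 : Int) - b.1, (c.2 : Int) - b.2)], some b)) (acc, some b)
      = (acc ++ cs.map (fun c => ((c.1 : Int) - b.1, (c.2 : Int) - b.2)), some b) := by
  induction cs generalizing acc with
  | nil => simp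
  | cons c t ih => simp [List.foldl_cons, ih]

-- A's nested sentinel pass over a piece equals the match-normalize of its cell list.
theorem cpf_A_piece (piece : List (List Int)) :
    ((List.range piece.length).foldl (fun st (y : Nat) =>
      (List.range (piece.headD []).length).foldl
        (fun (st : List (Int × Int) × Option (Int × Int)) (x : Nat) =>
          if ((piece.getD y []).getD x 0) ≠ 0 then
            match st.2 with
            | none   => (st.1 ++ [((0 : Int), (0 : Int))], some ((y : Int), (x : Int)))
            | some b => (st.1 ++ [((y : Int) - b.1, (x : Int) - b.2)], some b)
          else st) st) (([], none) : List (Int × Int) × Option (Int × Int))).1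
    = (match cellsOf (piece.headD []).length piece with
      | [] => ([] : List (Int × Int))
      | b :: rest => (b :: rest).map (fun c => ((c.1 : Int) - (b.1 : Int), (c.2 : Int) - (b.2 : Int)))) := by
  have hA : ((List.range piece.length).foldl (fun st (y : Nat) =>
      (List.range (piece.headD []).length).foldl
        (fun (st : List (Int × Int) × Option (Int × Int)) (x : Nat) =>
          if ((piece.getD y []).getD x 0) ≠ 0 then
            match st.2 with
            | none   => (st.1 ++ [((0 : Int), (0 : Int))], some ((y : Int), (x : Int)))
            | some b => (st.1 ++ [((y : Int) - b.1, (x : Int) - b.2)], some b)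
          else st) st) (([], none) : List (Int × Int) × Option (Int × Int)))
      = (cellsOf (piece.headD []).length piece).foldl
          (fun (st : List (Int × Int) × Option (Int × Int)) c =>
            match st.2 with
            | none   => (st.1 ++ [((0 : Int), (0 : Int))], some ((c.1 : Int), (c.2 : Int)))
            | some b => (st.1 ++ [((c.1 : Int) - b.1, (c.2 : Int) - b.2)], some b))
          (([], none) : List (Int × Int) × Option (Int × Int)) := by
    unfold cellsOf
    rw [← PySem.List.foldl_ite_eq_foldl_filter, List.foldl_flatMap]
    simp only [List.foldl_map]
  rw [hA]
  cases h : cellsOf (piece.headD []).length piece with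
  | nil => rfl
  | cons c0 rest =>
    simp only [List.foldl_cons, List.map_cons]
    rw [cpf_foldl_some]
    simp

-- shifting enumerate's start shifts every index
theorem enumerate_shift {α : Type} (xs : List α) (s t : Int) :
    PySem.List.enumerate xs (s + t) = (PySem.List.enumerate xs s).map (fun p => (p.1 + t, p.2)) := by
  induction xs generalizing s with
  | nil => simp [PySem.List.enumerate_nil]
  | cons a xs ih =>
    simp only [PySem.List.enumerate_cons, List.map_cons]
    rw [show s + t + 1 = (s + 1) + t by ring, ih]

-- a comprehension with a test is a filter followed by a map
theorem filterMap_if_eq_filter_map {α β : Type} (l : List α) (p : α → Prop) [DecidablePred p] (g : α → β) :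
    l.filterMap (fun x => if p x then some (g x) else none)
      = (l.filter (fun x => decide (p x))).map g := by
  induction l with
  | nil => rfl
  | cons a t ih => by_cases h : p a <;> simp [h, ih]

-- the nonzero flat indices of one row, enumerated from 0
theorem enum_row_filter (v : List Int) :
    (PySem.List.enumerate v 0).filterMap (fun p => if p.2 ≠ 0 then some p.1 else none)
      = ((List.range v.length).filter (fun x => decide (v.getD x 0 ≠ 0))).map
          (fun x => ((x : Nat) : Int)) := by
  rw [PySem.List.enumerate_eq_map_pyRange v 0, List.filterMap_map]
  have h1 : PySem.List.pyRange 0 (PySem.List.len v) = (List.range v.length).map (fun k : Nat => (k : Int)) := by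
    rw [show PySem.List.len v = (v.length : Int) from rfl, PySem.List.pyRange_one]
    simp
  rw [h1, List.filterMap_map]
  have h2 : (((fun p : Int × Int => if p.2 ≠ 0 then some p.1 else none)
        ∘ (fun j => (j, PySem.List.pyGetD v j 0))) ∘ (fun k : Nat => (k : Int)))
      = fun k : Nat => if v.getD k 0 ≠ 0 then some ((k : Nat) : Int) else none := by
    funext k
    simp [Function.comp_apply, PySem.List.pyGetD_natCast]
  rw [h2, filterMap_if_eq_filter_map (g := fun k : Nat => ((k : Nat) : Int))
        (p := fun k => v.getD k 0 ≠ 0)]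

-- B's nonzero flat indices are exactly the row-major cells, encoded as y*w + x.
theorem cpf_B_idxs (w : Nat) (rows : List (List Int)) (h : ∀ r ∈ rows, w ≤ r.length) :
    (PySem.List.enumerate (rows.foldl (fun acc row => acc ++ PySem.List.slice row none (some (w : Int))) []) 0).filterMap
        (fun p => if p.2 ≠ 0 then some p.1 else none)
      = (cellsOf w rows).map (fun c => ((c.1 * w + c.2 : Nat) : Int)) := by
  rw [PySem.List.foldl_append_eq_flatMap, List.nil_append]
  induction rows with
  | nil => simp [cellsOf, PySem.List.enumerate_nil]
  | cons r rows ih =>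
    have hr : w ≤ r.length := h r (List.mem_cons_self ..)
    have hlen : (PySem.List.slice r none (some (w : Int))).length = w := by
      rw [PySem.List.slice_to_natCast, List.length_take, min_eq_left hr]
    rw [List.flatMap_cons, PySem.List.enumerate_append, List.filterMap_append, hlen]
    have hcells : cellsOf w (r :: rows)
        = (((List.range w).filter (fun x => decide (r.getD x 0 ≠ 0))).map (fun x => ((0 : Nat), x)))
          ++ (cellsOf w rows).map (fun c => (c.1 + 1, c.2)) := by
      unfold cellsOf
      rw [List.length_cons, List.range_succ_eq_map, List.flatMap_cons, List.filter_append]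
      refine congrArg₂ _ ?_ ?_
      · rw [List.filter_map]
        simp [Function.comp_def]
      · simp only [List.flatMap_map, List.filter_flatMap, List.map_flatMap]
        refine List.flatMap_congr (fun y _ => ?_)
        rw [List.filter_map, List.filter_map, List.map_map]
        refine congrArg₂ _ rfl ?_
        refine List.filter_congr (fun x _ => ?_)
        simp
    rw [hcells, List.map_append, List.map_map]
    refine congrArg₂ _ ?_ ?_
    · -- first row
      rw [PySem.List.slice_to_natCast, enum_row_filter, List.length_take, min_eq_left hr]
      have hfil : (List.range w).filter (fun x => decide ((List.take w r).getD x 0 ≠ 0))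
          = (List.range w).filter (fun x => decide (r.getD x 0 ≠ 0)) := by
        refine List.filter_congr (fun x hx => ?_)
        have hxw : x < w := List.mem_range.mp hx
        have h3 : (List.take w r).getD x 0 = r.getD x 0 := by
          rw [List.getD_eq_getElem?_getD, List.getD_eq_getElem?_getD,
            List.getElem?_take_of_lt hxw]
        simp only [h3]
      rw [hfil]
      refine List.map_congr_left (fun x _ => ?_)
      simp
    · -- remaining rows, shifted by w
      rw [enumerate_shift _ 0 (w : Int), List.filterMap_map]
      have hcomp : ((fun p : Int × Int => if p.2 ≠ 0 then some p.1 else none)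
            ∘ (fun p : Int × Int => (p.1 + (w : Int), p.2)))
          = fun p : Int × Int => ((if p.2 ≠ 0 then some p.1 else none).map (· + (w : Int))) := by
        funext p; by_cases hp : p.2 ≠ 0 <;> simp [hp]
      rw [hcomp, ← List.map_filterMap, ih (fun r hr' => h r (List.mem_cons_of_mem _ hr')),
        List.map_map, List.map_map]
      refine List.map_congr_left (fun c _ => ?_)
      simp only [Function.comp_apply]
      push_cast
      ring

-- every cell of cellsOf has its column below w
theorem cellsOf_col_lt (w : Nat) (rows : List (List Int)) {c : Nat × Nat}
    (hc : c ∈ cellsOf w rows) : c.2 < w := by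
  unfold cellsOf at hc
  have := (List.mem_filter.mp hc).1
  simp only [List.mem_flatMap, List.mem_map, List.mem_range] at this
  obtain ⟨y, -, x, hx, rfl⟩ := this
  exact hx

-- decoding y*w + x with // and % recovers (y, x) when x < w
theorem decode_cell (w y x : Nat) (hx : x < w) :
    PySem.Int.floordiv ((y * w + x : Nat) : Int) (w : Int) = (y : Int)
    ∧ PySem.Int.mod ((y * w + x : Nat) : Int) (w : Int) = (x : Int) := by
  have hw : 0 < w := lt_of_le_of_lt (Nat.zero_le x) hx
  constructor
  · rw [PySem.Int.floordiv_natCast]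
    congr 1
    rw [Nat.add_comm, Nat.add_mul_div_right _ _ hw, Nat.div_eq_of_lt hx, Nat.zero_add]
  · rw [PySem.Int.mod_natCast]
    congr 1
    rw [Nat.add_comm, Nat.add_mul_mod_self_right, Nat.mod_eq_of_lt hx]

-- per-piece equality: A's sentinel pass = B's flatten/enumerate/divmod reconstruction.
theorem cpf_piece_eq (piece : List (List Int)) (h : ∀ r ∈ piece, (piece.headD []).length ≤ r.length) :
    ((List.range piece.length).foldl (fun st (y : Nat) =>
      (List.range (piece.headD []).length).foldl
        (fun (st : List (Int × Int) × Option (Int × Int)) (x : Nat) =>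
          if ((piece.getD y []).getD x 0) ≠ 0 then
            match st.2 with
            | none   => (st.1 ++ [((0 : Int), (0 : Int))], some ((y : Int), (x : Int)))
            | some b => (st.1 ++ [((y : Int) - b.1, (x : Int) - b.2)], some b)
          else st) st) (([], none) : List (Int × Int) × Option (Int × Int))).1
    = (match (PySem.List.enumerate (piece.foldl (fun acc row => acc ++ PySem.List.slice row none (some (((piece.headD []).length : Nat) : Int))) []) 0).filterMap
          (fun p => if p.2 ≠ 0 then some p.1 else none) with
      | ([] : List Int) => ([] : List (Int × Int))
      | i0 :: rest => ((i0 :: rest) : List Int).map (fun i =>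
          (PySem.Int.floordiv i (((piece.headD []).length : Nat) : Int) - PySem.Int.floordiv i0 (((piece.headD []).length : Nat) : Int),
           PySem.Int.mod i (((piece.headD []).length : Nat) : Int) - PySem.Int.mod i0 (((piece.headD []).length : Nat) : Int)))) := by
  rw [cpf_A_piece, cpf_B_idxs (piece.headD []).length piece h]
  cases hc : cellsOf (piece.headD []).length piece with
  | nil => rfl
  | cons b rest =>
    simp only [List.map_cons, List.map_map]
    have hbw : b.2 < (piece.headD []).length :=
      cellsOf_col_lt _ piece (hc ▸ List.mem_cons_self ..)
    have hdb := decode_cell (piece.headD []).length b.1 b.2 hbw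
    refine congrArg₂ _ ?_ ?_
    · simp only [hdb.1, hdb.2, sub_self]
    · refine List.map_congr_left (fun c hcm => ?_)
      have hcw : c.2 < (piece.headD []).length :=
        cellsOf_col_lt _ piece (hc ▸ List.mem_cons_of_mem _ hcm)
      have hd := decode_cell (piece.headD []).length c.1 c.2 hcw
      simp only [Function.comp_apply, hd.1, hd.2, hdb.1, hdb.2]

-- ===== VERDICT (by name: the statement is the Claim_ definition above) =====
theorem convert_piece_format_spec : Claim_equal_convert_piece_format := by
  intro pieces_2d _ hpre
  unfold Spec_convert_piece_format convert_piece_format convert_piece_format_alt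
  rw [PySem.Dict.items_foldl_insert_fresh
        pieces_2d
        (fun (kv : String × List (List Int)) => kv.1)
        (fun (kv : String × List (List Int)) =>
          ((List.range kv.2.length).foldl (fun st (y : Nat) =>
            (List.range (kv.2.headD []).length).foldl
              (fun (st : List (Int × Int) × Option (Int × Int)) (x : Nat) =>
                if ((kv.2.getD y []).getD x 0) ≠ 0 then
                  match st.2 with
                  | none   => (st.1 ++ [((0 : Int), (0 : Int))], some ((y : Int), (x : Int)))
                  | some b => (st.1 ++ [((y : Int) - b.1, (x : Int) - b.2)], some b)
                else st) st) (([], none) : List (Int × Int) × Option (Int × Int))).1)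
        PySem.Dict.empty
        (fun a _ => PySem.Dict.contains_empty a.1) hpre.1]
  simp only [PySem.Dict.empty, List.nil_append]
  refine List.map_congr_left (fun kv hkv => ?_)
  rw [cpf_piece_eq kv.2 (hpre.2 kv hkv)]
  cases hE : (PySem.List.enumerate (kv.2.foldl (fun acc row => acc ++ PySem.List.slice row none (some (((kv.2.headD []).length : Nat) : Int))) []) 0).filterMap
      (fun p => if p.2 ≠ 0 then some p.1 else none) with
  | nil => rfl
  | cons i0 rest => rfl
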